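-- pv_equiv track=rewrite | github.com/adnan-armouti/cs6120 | lesson_5/chk.py | dom_frontier
-- ===== SOURCE A (Python) =====
-- def dom_frontier(blocks, next_map, idom, tree):
--     names = [b["name"] for b in blocks]
--     DF = {n: set() for n in names}
--
--     # local
--     for b in names:
--         for s in next_map.get(b, []):
--             if idom.get(s) != b:
--                 DF[b].add(s)
--
--     # postorder over dom tree
--     post = []
--     def walk(u):
--         for c in tree.get(u, []): walk(c)
--         post.append(u)
--     for r, d in idom.items():
--         if d is None:
--             walk(r)
--
--     # upward
--     for b in post:
--         for c in tree.get(b, []):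
--             for n in DF[c]:
--                 if idom.get(n) != b:
--                     DF[b].add(n)
--
--     return DF
-- ===== SOURCE B (Python) =====
-- def dom_frontier(blocks, next_map, idom, tree):
--     def local(u):
--         return {s for s in next_map.get(u, []) if idom.get(s) != u}
--
--     DF = {}
--     def df(u):
--         if u not in DF:
--             res = local(u)
--             for c in tree.get(u, []):
--                 res = res | {n for n in df(c) if idom.get(n) != u}
--             DF[u] = res
--         return DF[u]
--
--     for r, d in idom.items():
--         if d is None:
--             df(r)
--
--     return {b["name"]: DF[b["name"]] if b["name"] in DF else local(b["name"]) for b in blocks}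
-- ===== Notes on version B (the rewrite author's own statement) =====
-- stated objective: alternative
-- what changed: B replaces A's three imperative phases (seeded dict + local pass, explicit recursive postorder list, in-place upward union sweep over that list) by a single memoised top-down recursion df(u) = local(u) | filtered df(children) over the dominator tree, reading unknown blocks' frontiers directly as their local set.
import Mathlib
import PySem

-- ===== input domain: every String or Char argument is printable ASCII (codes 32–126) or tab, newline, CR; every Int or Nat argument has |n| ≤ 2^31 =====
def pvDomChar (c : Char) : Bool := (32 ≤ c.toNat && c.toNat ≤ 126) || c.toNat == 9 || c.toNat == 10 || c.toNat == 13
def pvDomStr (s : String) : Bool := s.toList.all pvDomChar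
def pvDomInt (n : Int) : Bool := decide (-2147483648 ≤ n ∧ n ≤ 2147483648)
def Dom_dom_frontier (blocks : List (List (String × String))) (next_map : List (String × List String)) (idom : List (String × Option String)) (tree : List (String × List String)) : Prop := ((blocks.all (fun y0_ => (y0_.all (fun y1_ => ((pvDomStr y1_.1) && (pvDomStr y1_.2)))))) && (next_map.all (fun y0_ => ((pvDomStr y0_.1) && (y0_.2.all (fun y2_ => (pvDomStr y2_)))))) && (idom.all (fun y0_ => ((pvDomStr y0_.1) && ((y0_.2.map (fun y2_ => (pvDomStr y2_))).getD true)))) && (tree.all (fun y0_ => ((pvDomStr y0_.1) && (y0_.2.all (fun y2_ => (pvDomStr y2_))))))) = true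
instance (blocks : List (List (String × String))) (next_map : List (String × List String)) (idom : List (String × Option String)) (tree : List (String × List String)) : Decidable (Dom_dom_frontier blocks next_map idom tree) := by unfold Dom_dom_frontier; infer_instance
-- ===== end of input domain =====

-- B rebuilds each frontier by memoised top-down recursion on the dominator tree instead of A's
-- explicit postorder list + in-place upward pass (objective: alternative decomposition, same cost).

-- shared helpers: first-match association-list lookup (= dict lookup under the convention),
-- Python's  d.get(k, [])  /  idom.get(s)  /  b["name"]  /  the 'for r,d in idom.items() if d is None' root scan
def pvGet {α : Type} (m : List (String × α)) (k : String) : Option α :=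
  (m.find? (fun p => p.1 == k)).map Prod.snd
def pvGetL (m : List (String × List String)) (u : String) : List String := (pvGet m u).getD []
def pvIG (idom : List (String × Option String)) (s : String) : Option String := (pvGet idom s).getD none
def pvNameOf (b : List (String × String)) : String := (pvGet b "name").getD ""
def pvRoots (idom : List (String × Option String)) : List String :=
  (PySem.List.dedup (idom.map Prod.fst)).filter (fun r => pvGet idom r == some none)

-- ===== PORT A =====
-- DF[b].add(v)  on the association list (no-op when b is absent; Python would raise KeyError there — excluded by Pre_)
def pvDadd (D : List (String × List String)) (k v : String) : List (String × List String) :=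
  D.map (fun p => if p.1 == k then (p.1, PySem.Set.add p.2 v) else p)

-- A's recursive 'walk' accumulating the postorder list; fuel tree.length+1 bounds the recursion depth
-- (sufficient on every input admitted by Pre_; Python recurses unboundedly and diverges on cyclic trees)
def pvWalkA (tree : List (String × List String)) : Nat → String → List String → List String
  | 0, _, acc => acc
  | fuel+1, u, acc => ((pvGetL tree u).foldl (fun a c => pvWalkA tree fuel c a) acc) ++ [u]

-- the body of A's upward loop for one postorder element b
def pvUP (idom : List (String × Option String)) (tree : List (String × List String))
    (D : List (String × List String)) (b : String) : List (String × List String) :=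
  (pvGetL tree b).foldl (fun D c =>
    ((pvGet D c).getD []).foldl (fun D n => if pvIG idom n ≠ some b then pvDadd D b n else D) D) D

def dom_frontier (blocks : List (List (String × String))) (next_map : List (String × List String)) (idom : List (String × Option String)) (tree : List (String × List String)) : List (String × List String) :=
  let names := blocks.map pvNameOf
  let DF0 := (PySem.List.dedup names).map (fun n => (n, ([] : List String)))
  let DF1 := names.foldl (fun D b =>
    (pvGetL next_map b).foldl (fun D s => if pvIG idom s ≠ some b then pvDadd D b s else D) D) DF0
  let post := (pvRoots idom).foldl (fun acc r => pvWalkA tree (tree.length + 1) r acc) []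
  post.foldl (pvUP idom tree) DF1

-- ===== PORT B =====
-- local(u) = {s for s in next_map.get(u, []) if idom.get(s) != u}
def pvLocalB (next_map : List (String × List String)) (idom : List (String × Option String)) (u : String) : List String :=
  PySem.Set.ofList ((pvGetL next_map u).filter (fun s => pvIG idom s ≠ some u))

-- DF[u] = res  (overwrite if present, else append — Python dict assignment)
def pvDinsert (D : List (String × List String)) (k : String) (v : List String) : List (String × List String) :=
  if (pvGet D k).isSome then D.map (fun p => if p.1 == k then (p.1, v) else p) else D ++ [(k, v)]

-- B's memoised df(u): returns (memo dict, df value); same fuel bound as A's walk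
def pvDfB (next_map : List (String × List String)) (idom : List (String × Option String))
    (tree : List (String × List String)) : Nat → String → List (String × List String) →
    List (String × List String) × List String
  | 0, _, DF => (DF, [])
  | fuel+1, u, DF =>
    if (pvGet DF u).isSome then (DF, (pvGet DF u).getD [])
    else
      let r := (pvGetL tree u).foldl
        (fun (p : List (String × List String) × List String) c =>
          let q := pvDfB next_map idom tree fuel c p.1
          (q.1, PySem.Set.union p.2 (PySem.Set.ofList (q.2.filter (fun n => pvIG idom n ≠ some u)))))
        (DF, pvLocalB next_map idom u)
      let DF' := pvDinsert r.1 u r.2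
      (DF', (pvGet DF' u).getD [])

def dom_frontier_alt (blocks : List (List (String × String))) (next_map : List (String × List String)) (idom : List (String × Option String)) (tree : List (String × List String)) : List (String × List String) :=
  let names := blocks.map pvNameOf
  let DFm := (pvRoots idom).foldl (fun D r => (pvDfB next_map idom tree (tree.length + 1) r D).1) []
  (PySem.List.dedup names).map (fun n =>
    (n, match pvGet DFm n with | some v => v | none => pvLocalB next_map idom n))

-- ===== PRECONDITION & SPEC =====
-- bounded-iteration reachability over the tree map, used only to state Pre_
def pvReachStep (tree : List (String × List String)) (S : List String) : List String :=
  S.foldl (fun acc u => PySem.Set.update acc (pvGetL tree u)) S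
def pvReachN (tree : List (String × List String)) (n : Nat) (S : List String) : List String :=
  (pvReachStep tree)^[n] S
def pvNBound (idom : List (String × Option String)) (tree : List (String × List String)) : Nat :=
  idom.length + 2 * tree.length + (tree.flatMap Prod.snd).length + 2
def pvR (idom : List (String × Option String)) (tree : List (String × List String)) : List String :=
  pvReachN tree (pvNBound idom tree) (PySem.Set.ofList (pvRoots idom))
def pvDescend (idom : List (String × Option String)) (tree : List (String × List String)) (u : String) : List String :=
  pvReachN tree (pvNBound idom tree) (PySem.Set.ofList (pvGetL tree u))

-- Pre_ excludes exactly the inputs on which A fails to return a value — a block without a "name" key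
-- (KeyError), a cycle in the dominator tree reachable from a root (infinite recursion), or a walked
-- tree node outside the block names (KeyError on DF[...]); the last condition is stated for every
-- reachable node, which for checkability also excludes a few inputs where A returns because the
-- foreign node happens to receive no frontier element.
def Pre_dom_frontier (blocks : List (List (String × String))) (next_map : List (String × List String)) (idom : List (String × Option String)) (tree : List (String × List String)) : Prop :=
  (∀ b ∈ blocks, (pvGet b "name").isSome = true)
  ∧ (∀ u ∈ pvR idom tree, u ∉ pvDescend idom tree u)
  ∧ (∀ u ∈ pvR idom tree, ∀ c ∈ pvGetL tree u, c ∈ blocks.map pvNameOf)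
  ∧ (∀ u ∈ pvR idom tree, pvGetL tree u ≠ [] → u ∈ blocks.map pvNameOf)
instance (blocks : List (List (String × String))) (next_map : List (String × List String)) (idom : List (String × Option String)) (tree : List (String × List String)) : Decidable (Pre_dom_frontier blocks next_map idom tree) := by
  unfold Pre_dom_frontier; infer_instance

def pvWitness_dom_frontier : (List (List (String × String))) × (List (String × List String)) × (List (String × Option String)) × (List (String × List String)) :=
  ([[("name", "a")], [("name", "b")], [("name", "c")], [("name", "d")]],
   [("a", ["b", "c"]), ("b", ["d"]), ("c", ["d"])],
   [("a", none), ("b", some "a"), ("c", some "a"), ("d", some "a")],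
   [("a", ["b", "c", "d"])])

def Spec_dom_frontier (blocks : List (List (String × String))) (next_map : List (String × List String)) (idom : List (String × Option String)) (tree : List (String × List String)) (out : List (String × List String)) : Prop := out = dom_frontier_alt blocks next_map idom tree
instance (blocks : List (List (String × String))) (next_map : List (String × List String)) (idom : List (String × Option String)) (tree : List (String × List String)) (out : List (String × List String)) : Decidable (Spec_dom_frontier blocks next_map idom tree out) := by unfold Spec_dom_frontier; infer_instance

-- ===== CLAIM (what is proved, stated in full; the proofs are below) =====
def Claim_equal_dom_frontier : Prop := ∀ (blocks : List (List (String × String))) (next_map : List (String × List String)) (idom : List (String × Option String)) (tree : List (String × List String)), Dom_dom_frontier blocks next_map idom tree → Pre_dom_frontier blocks next_map idom tree → Spec_dom_frontier blocks next_map idom tree (dom_frontier blocks next_map idom tree)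

-- ===== LEMMAS AND PROOFS =====

theorem pv_add_self {s : List String} {x : String} (h : x ∈ s) : PySem.Set.add s x = s := by
  simp [PySem.Set.add, PySem.Set.contains, h]

theorem pv_add_notmem {s : List String} {x : String} (h : x ∉ s) :
    PySem.Set.add s x = s ++ [x] := by
  simp [PySem.Set.add, PySem.Set.contains, h]

theorem pv_update_noop {l s : List String} (h : ∀ x ∈ l, x ∈ s) : PySem.Set.update s l = s := by
  induction l generalizing s with
  | nil => rfl
  | cons a l ih =>
    show PySem.Set.update (PySem.Set.add s a) l = s
    rw [pv_add_self (h a (by simp))]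
    exact ih (fun x hx => h x (by simp [hx]))

theorem pv_update_add (s t : List String) (x : String) :
    PySem.Set.update s (PySem.Set.add t x) = PySem.Set.add (PySem.Set.update s t) x := by
  by_cases hx : x ∈ t
  · rw [pv_add_self hx, pv_add_self ((PySem.Set.mem_update s t x).mpr (Or.inr hx))]
  · rw [pv_add_notmem hx]
    show List.foldl PySem.Set.add s (t ++ [x]) = _
    rw [List.foldl_append]
    rfl

theorem pv_update_update (l : List String) (t s : List String) :
    PySem.Set.update s (PySem.Set.update t l) = PySem.Set.update (PySem.Set.update s t) l := by
  induction l generalizing t with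
  | nil => rfl
  | cons a l ih =>
    show PySem.Set.update s (PySem.Set.update (PySem.Set.add t a) l)
        = PySem.Set.update (PySem.Set.update s t) (a :: l)
    rw [ih (PySem.Set.add t a)]
    show PySem.Set.update (PySem.Set.update s (PySem.Set.add t a)) l = _
    rw [pv_update_add]
    rfl

theorem pv_update_ofList (s l : List String) :
    PySem.Set.update s (PySem.Set.ofList l) = PySem.Set.update s l := by
  have h := pv_update_update l [] s
  rw [show PySem.Set.update ([] : List String) l = PySem.Set.ofList l from rfl] at h
  rw [h]
  rfl

-- === dict-as-map lemmas ===
theorem pv_get_map (K : List String) (val : String → List String) (x : String) :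
    pvGet (K.map (fun n => (n, val n))) x = if x ∈ K then some (val x) else none := by
  induction K with
  | nil => rfl
  | cons a K ih =>
    by_cases h : a = x
    · subst h
      simp [pvGet, List.find?]
    · simp only [List.map_cons, pvGet, List.find?]
      have : ((a, val a).1 == x) = false := by simpa using h
      rw [this]
      show pvGet (K.map (fun n => (n, val n))) x = _
      rw [ih]
      by_cases hx : x ∈ K <;> simp [hx, Ne.symm h]

theorem pv_dadd_map (K : List String) (val : String → List String) (k v : String) :
    pvDadd (K.map (fun n => (n, val n))) k v
      = K.map (fun n => (n, if n = k then PySem.Set.add (val n) v else val n)) := by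
  unfold pvDadd
  rw [List.map_map]
  apply List.map_congr_left
  intro a _
  by_cases h : a = k <;> simp [h]

theorem pv_folddadd_map (xs : List String) (K : List String) (val : String → List String)
    (k : String) (p : String → Prop) [DecidablePred p] :
    xs.foldl (fun D n => if p n then pvDadd D k n else D) (K.map (fun n => (n, val n)))
      = K.map (fun n => (n, if n = k
          then PySem.Set.update (val n) (xs.filter (fun x => decide (p x))) else val n)) := by
  induction xs generalizing val with
  | nil =>
    simp only [List.foldl_nil, List.filter_nil]
    apply List.map_congr_left; intro a _
    by_cases h : a = k <;> simp [h, PySem.Set.update]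
  | cons x xs ih =>
    by_cases h : p x
    · simp only [List.foldl_cons, if_pos h, List.filter_cons, decide_eq_true h]
      rw [pv_dadd_map, ih]
      apply List.map_congr_left; intro a _
      by_cases ha : a = k
      · simp only [ha]
        show _ = (k, PySem.Set.update (val k) (x :: List.filter _ xs))
        rfl
      · simp [ha]
    · simp only [List.foldl_cons, if_neg h, List.filter_cons, decide_eq_false h]
      rw [ih]
      simp

-- === reachability lemmas ===
theorem pv_reachN_zero (tree : List (String × List String)) (S : List String) :
    pvReachN tree 0 S = S := rfl

theorem pv_reachN_succ' (tree : List (String × List String)) (n : Nat) (S : List String) :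
    pvReachN tree (n + 1) S = pvReachStep tree (pvReachN tree n S) :=
  Function.iterate_succ_apply' _ _ _

theorem pv_mem_foldl_update {tree : List (String × List String)} {x : String}
    (L : List String) (acc : List String)
    (h : x ∈ acc ∨ ∃ u ∈ L, x ∈ pvGetL tree u) :
    x ∈ L.foldl (fun a u => PySem.Set.update a (pvGetL tree u)) acc := by
  induction L generalizing acc with
  | nil => simpa using h
  | cons a L ih =>
    simp only [List.foldl_cons]
    apply ih
    rcases h with h | ⟨u, hu, hx⟩
    · exact Or.inl ((PySem.Set.mem_update _ _ _).mpr (Or.inl h))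
    · rcases List.mem_cons.mp hu with rfl | hu
      · exact Or.inl ((PySem.Set.mem_update _ _ _).mpr (Or.inr hx))
      · exact Or.inr ⟨u, hu, hx⟩

theorem pv_mem_reachStep_self {tree : List (String × List String)} {S : List String} {x : String}
    (h : x ∈ S) : x ∈ pvReachStep tree S :=
  pv_mem_foldl_update S S (Or.inl h)

theorem pv_mem_reachStep_child {tree : List (String × List String)} {S : List String}
    {u c : String} (hu : u ∈ S) (hc : c ∈ pvGetL tree u) : c ∈ pvReachStep tree S :=
  pv_mem_foldl_update S S (Or.inr ⟨u, hu, hc⟩)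

theorem pv_reach_mono {tree : List (String × List String)} {S : List String} {x : String} :
    ∀ {m n : Nat}, m ≤ n → x ∈ pvReachN tree m S → x ∈ pvReachN tree n S := by
  intro m n hmn hx
  induction n with
  | zero => simpa [Nat.le_zero.mp hmn] using hx
  | succ n ih =>
    rcases Nat.lt_or_ge m (n+1) with h | h
    · rw [pv_reachN_succ']
      exact pv_mem_reachStep_self (ih (Nat.lt_succ_iff.mp h))
    · have : m = n + 1 := Nat.le_antisymm hmn h
      subst this; exact hx

-- === chains from the roots through the tree ===
inductive pvVia (idom : List (String × Option String)) (tree : List (String × List String)) :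
    List String → String → Prop
  | root (r : String) : r ∈ pvRoots idom → pvVia idom tree [] r
  | step (P : List String) (u c : String) :
      pvVia idom tree P u → c ∈ pvGetL tree u → pvVia idom tree (P ++ [u]) c

theorem pv_via_reach {idom : List (String × Option String)} {tree : List (String × List String)}
    {P : List String} {u : String} (h : pvVia idom tree P u) :
    u ∈ pvReachN tree P.length (PySem.Set.ofList (pvRoots idom)) := by
  induction h with
  | root r hr => simpa [pv_reachN_zero] using (PySem.Set.mem_ofList _ _).mpr hr
  | step P v c hv hc ih =>
    simp only [List.length_append, List.length_cons, List.length_nil]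
    rw [pv_reachN_succ']
    exact pv_mem_reachStep_child ih hc

theorem pv_via_keys {idom : List (String × Option String)} {tree : List (String × List String)}
    {P : List String} {u : String} (h : pvVia idom tree P u) :
    ∀ p ∈ P, p ∈ tree.map Prod.fst := by
  induction h with
  | root => simp
  | step P v c hv hc ih =>
    intro p hp
    rcases List.mem_append.mp hp with hp | hp
    · exact ih p hp
    · have hpv : p = v := by simpa using hp
      subst hpv
      have : pvGet tree p ≠ none := by
        intro hnone
        rw [show pvGetL tree p = [] by simp [pvGetL, hnone]] at hc
        exact absurd hc (List.not_mem_nil)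
      rcases hopt : pvGet tree p with _ | l
      · exact absurd hopt this
      · unfold pvGet at hopt
        rcases hfind : tree.find? (fun q => q.1 == p) with _ | q
        · rw [hfind] at hopt; simp at hopt
        · have hq := List.mem_of_find?_eq_some hfind
          have : q.1 = p := by
            have := List.find?_some hfind
            simpa using this
          subst this
          exact List.mem_map.mpr ⟨q, hq, rfl⟩

theorem pv_via_from {idom : List (String × Option String)} {tree : List (String × List String)}
    {P : List String} {u : String} (h : pvVia idom tree P u) :
    ∀ x ∈ P, u ∈ pvReachN tree P.length (PySem.Set.ofList (pvGetL tree x)) := by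
  induction h with
  | root => simp
  | step P v c hv hc ih =>
    intro x hx
    simp only [List.length_append, List.length_cons, List.length_nil]
    rcases List.mem_append.mp hx with hx | hx
    · rw [pv_reachN_succ']
      exact pv_mem_reachStep_child (ih x hx) hc
    · have hxv : x = v := by simpa using hx
      subst hxv
      exact pv_reach_mono (Nat.zero_le _) ((PySem.Set.mem_ofList _ _).mpr hc)

theorem pv_via_len_of_nodup {idom : List (String × Option String)}
    {tree : List (String × List String)} {P : List String} {u : String}
    (h : pvVia idom tree P u) (hnd : P.Nodup) : P.length ≤ tree.length := by
  have hsub : P ⊆ tree.map Prod.fst := fun p hp => pv_via_keys h p hp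
  have := (hnd.subperm hsub).length_le
  simpa using this

theorem pv_via_R {idom : List (String × Option String)} {tree : List (String × List String)}
    {P : List String} {u : String} (h : pvVia idom tree P u) (hnd : P.Nodup) :
    u ∈ pvR idom tree := by
  apply pv_reach_mono (show P.length ≤ pvNBound idom tree by
    have := pv_via_len_of_nodup h hnd
    unfold pvNBound; omega)
  exact pv_via_reach h

theorem pv_via_nostep_aux {idom : List (String × Option String)}
    {tree : List (String × List String)}
    (hCyc : ∀ u ∈ pvR idom tree, u ∉ pvDescend idom tree u)
    {P : List String} {u c : String} (h : pvVia idom tree P u) (hnd : P.Nodup)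
    (hc : c ∈ pvGetL tree u) : c ∉ P ++ [u] := by
  intro hmem
  have hviac : pvVia idom tree (P ++ [u]) c := pvVia.step P u c h hc
  -- c is reachable from the roots
  have hcR : c ∈ pvR idom tree := by
    apply pv_reach_mono (show (P ++ [u]).length ≤ pvNBound idom tree by
      have := pv_via_len_of_nodup h hnd
      simp only [List.length_append, List.length_cons, List.length_nil]
      unfold pvNBound; omega)
    exact pv_via_reach hviac
  -- and c reaches itself
  have hcD : c ∈ pvDescend idom tree c := by
    rcases List.mem_append.mp hmem with hcP | hcu
    · -- c ∈ P : u reachable from tG c, then u ↛ c closes the cycle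
      have hu := pv_via_from h c hcP
      have : c ∈ pvReachN tree (P.length + 1) (PySem.Set.ofList (pvGetL tree c)) := by
        rw [pv_reachN_succ']
        exact pv_mem_reachStep_child hu hc
      apply pv_reach_mono (show P.length + 1 ≤ pvNBound idom tree by
        have := pv_via_len_of_nodup h hnd
        unfold pvNBound; omega) this
    · -- c = u : a self-loop
      have hcu : c = u := by simpa using hcu
      subst hcu
      exact pv_reach_mono (Nat.zero_le _) ((PySem.Set.mem_ofList _ _).mpr hc)
  exact hCyc c hcR hcD

theorem pv_via_nodup {idom : List (String × Option String)}
    {tree : List (String × List String)}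
    (hCyc : ∀ u ∈ pvR idom tree, u ∉ pvDescend idom tree u)
    {P : List String} {u : String} (h : pvVia idom tree P u) : (P ++ [u]).Nodup := by
  induction h with
  | root r hr => simp
  | step P v c hv hc ih =>
    have hndP : P.Nodup := (List.nodup_append.mp ih).1
    have hnotin : c ∉ P ++ [v] := pv_via_nostep_aux hCyc hv hndP hc
    rw [List.nodup_append]
    refine ⟨ih, by simp, ?_⟩
    intro a ha b hb
    have hbc : b = c := by simpa using hb
    subst hbc
    intro hab
    subst hab
    exact hnotin ha

theorem pv_via_nostep {idom : List (String × Option String)}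
    {tree : List (String × List String)}
    (hCyc : ∀ u ∈ pvR idom tree, u ∉ pvDescend idom tree u)
    {P : List String} {u c : String} (h : pvVia idom tree P u)
    (hc : c ∈ pvGetL tree u) : c ∉ P ++ [u] :=
  pv_via_nostep_aux hCyc h (List.nodup_append.mp (pv_via_nodup hCyc h)).1 hc

theorem pv_via_nodupP {idom : List (String × Option String)}
    {tree : List (String × List String)}
    (hCyc : ∀ u ∈ pvR idom tree, u ∉ pvDescend idom tree u)
    {P : List String} {u : String} (h : pvVia idom tree P u) : P.Nodup :=
  (List.nodup_append.mp (pv_via_nodup hCyc h)).1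

theorem pv_via_inR {idom : List (String × Option String)}
    {tree : List (String × List String)}
    (hCyc : ∀ u ∈ pvR idom tree, u ∉ pvDescend idom tree u)
    {P : List String} {u : String} (h : pvVia idom tree P u) : u ∈ pvR idom tree :=
  pv_via_R h (pv_via_nodupP hCyc h)

theorem pv_via_len {idom : List (String × Option String)}
    {tree : List (String × List String)}
    (hCyc : ∀ u ∈ pvR idom tree, u ∉ pvDescend idom tree u)
    {P : List String} {u : String} (h : pvVia idom tree P u) : P.length ≤ tree.length :=
  pv_via_len_of_nodup h (pv_via_nodupP hCyc h)

theorem pv_via_len_strict {idom : List (String × Option String)}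
    {tree : List (String × List String)}
    (hCyc : ∀ u ∈ pvR idom tree, u ∉ pvDescend idom tree u)
    {P : List String} {u : String} (h : pvVia idom tree P u)
    (hne : pvGetL tree u ≠ []) : P.length < tree.length := by
  have hnd : (P ++ [u]).Nodup := pv_via_nodup hCyc h
  have hsub : (P ++ [u]) ⊆ tree.map Prod.fst := by
    intro p hp
    rcases List.mem_append.mp hp with hp | hp
    · exact pv_via_keys h p hp
    · have : p = u := by simpa using hp
      subst this
      -- u has an entry since its child list is nonempty
      rcases hl : pvGet tree p with _ | l
      · exact absurd (by simp [pvGetL, hl]) hne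
      · unfold pvGet at hl
        rcases hfind : tree.find? (fun q => q.1 == p) with _ | q
        · rw [hfind] at hl; simp at hl
        · have hq := List.mem_of_find?_eq_some hfind
          have : q.1 = p := by simpa using List.find?_some hfind
          subst this
          exact List.mem_map.mpr ⟨q, hq, rfl⟩
  have := (hnd.subperm hsub).length_le
  simp only [List.length_append, List.length_cons, List.length_nil, List.length_map] at this
  omega

-- === the pure frontier function (B's recursion without the memo) ===
def pvDfP (next_map : List (String × List String)) (idom : List (String × Option String))
    (tree : List (String × List String)) : Nat → String → List String
  | 0, _ => []
  | fuel+1, u => (pvGetL tree u).foldl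
      (fun res c => PySem.Set.update res
        ((pvDfP next_map idom tree fuel c).filter (fun n => decide (pvIG idom n ≠ some u))))
      (pvLocalB next_map idom u)

def pvDFP (next_map : List (String × List String)) (idom : List (String × Option String))
    (tree : List (String × List String)) (u : String) : List String :=
  pvDfP next_map idom tree (tree.length + 1) u

theorem pv_foldl_congr {α β : Type} {l : List β} {f g : α → β → α} {s : α}
    (h : ∀ a, ∀ b ∈ l, f a b = g a b) : l.foldl f s = l.foldl g s := by
  induction l generalizing s with
  | nil => rfl
  | cons x l ih =>
    simp only [List.foldl_cons]
    rw [h s x (by simp)]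
    exact ih (fun a b hb => h a b (by simp [hb]))

theorem pv_dfP_mono {next_map : List (String × List String)}
    {idom : List (String × Option String)} {tree : List (String × List String)}
    (hCyc : ∀ u ∈ pvR idom tree, u ∉ pvDescend idom tree u) :
    ∀ (f₁ : Nat) {P : List String} {u : String} (f₂ : Nat), pvVia idom tree P u →
      tree.length < f₁ + P.length → tree.length < f₂ + P.length →
      pvDfP next_map idom tree f₁ u = pvDfP next_map idom tree f₂ u := by
  intro f₁
  induction f₁ with
  | zero =>
    intro P u f₂ hvia h1 _
    exact absurd h1 (by have := pv_via_len hCyc hvia; omega)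
  | succ f₁ ih =>
    intro P u f₂ hvia h1 h2
    rcases f₂ with _ | f₂
    · exact absurd h2 (by have := pv_via_len hCyc hvia; omega)
    · show pvDfP next_map idom tree (f₁+1) u = pvDfP next_map idom tree (f₂+1) u
      unfold pvDfP
      apply pv_foldl_congr
      intro a c hc
      have hstep : pvVia idom tree (P ++ [u]) c := pvVia.step P u c hvia hc
      rw [ih f₂ hstep (by simp only [List.length_append, List.length_cons, List.length_nil]; omega)
        (by simp only [List.length_append, List.length_cons, List.length_nil]; omega)]

theorem pv_DFP_unfold {next_map : List (String × List String)}
    {idom : List (String × Option String)} {tree : List (String × List String)}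
    (hCyc : ∀ u ∈ pvR idom tree, u ∉ pvDescend idom tree u)
    {P : List String} {u : String} (hvia : pvVia idom tree P u) :
    pvDFP next_map idom tree u = (pvGetL tree u).foldl
      (fun res c => PySem.Set.update res
        ((pvDFP next_map idom tree c).filter (fun n => decide (pvIG idom n ≠ some u))))
      (pvLocalB next_map idom u) := by
  unfold pvDFP
  rw [show pvDfP next_map idom tree (tree.length + 1) u = (pvGetL tree u).foldl
      (fun res c => PySem.Set.update res
        ((pvDfP next_map idom tree tree.length c).filter (fun n => decide (pvIG idom n ≠ some u))))
      (pvLocalB next_map idom u) from rfl]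
  apply pv_foldl_congr
  intro a c hc
  have hstep : pvVia idom tree (P ++ [u]) c := pvVia.step P u c hvia hc
  rw [pv_dfP_mono hCyc tree.length (tree.length+1) hstep
    (by simp only [List.length_append, List.length_cons, List.length_nil]; omega)
    (by simp only [List.length_append, List.length_cons, List.length_nil]; omega)]

theorem pv_mem_foldl_update2 {h : String → List String} {x : String} :
    ∀ (l : List String) (s : List String),
      (x ∈ s ∨ ∃ c ∈ l, x ∈ h c) →
      x ∈ l.foldl (fun s c => PySem.Set.update s (h c)) s := by
  intro l
  induction l with
  | nil => intro s hs; simpa using hs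
  | cons a l ih =>
    intro s hs
    simp only [List.foldl_cons]
    apply ih
    rcases hs with hs | ⟨c, hc, hx⟩
    · exact Or.inl ((PySem.Set.mem_update _ _ _).mpr (Or.inl hs))
    · rcases List.mem_cons.mp hc with rfl | hc
      · exact Or.inl ((PySem.Set.mem_update _ _ _).mpr (Or.inr hx))
      · exact Or.inr ⟨c, hc, hx⟩

theorem pv_DFP_sub {next_map : List (String × List String)}
    {idom : List (String × Option String)} {tree : List (String × List String)}
    (hCyc : ∀ u ∈ pvR idom tree, u ∉ pvDescend idom tree u)
    {P : List String} {u : String} (hvia : pvVia idom tree P u)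
    {c : String} (hc : c ∈ pvGetL tree u) {x : String}
    (hx : x ∈ (pvDFP next_map idom tree c).filter (fun n => decide (pvIG idom n ≠ some u))) :
    x ∈ pvDFP next_map idom tree u := by
  rw [pv_DFP_unfold hCyc hvia]
  exact pv_mem_foldl_update2 _ _ (Or.inr ⟨c, hc, hx⟩)

-- === A's postorder as a pure list ===
def pvWalkList (tree : List (String × List String)) : Nat → String → List String
  | 0, _ => []
  | fuel+1, u => ((pvGetL tree u).map (fun c => pvWalkList tree fuel c)).flatten ++ [u]

theorem pv_walkA_eq (tree : List (String × List String)) :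
    ∀ (fuel : Nat) (u : String) (acc : List String),
      pvWalkA tree fuel u acc = acc ++ pvWalkList tree fuel u := by
  intro fuel
  induction fuel with
  | zero => intro u acc; simp [pvWalkA, pvWalkList]
  | succ fuel ih =>
    intro u acc
    show ((pvGetL tree u).foldl (fun a c => pvWalkA tree fuel c a) acc) ++ [u]
        = acc ++ (((pvGetL tree u).map (fun c => pvWalkList tree fuel c)).flatten ++ [u])
    have aux : ∀ (cs : List String) (acc : List String),
        cs.foldl (fun a c => pvWalkA tree fuel c a) acc
          = acc ++ (cs.map (fun c => pvWalkList tree fuel c)).flatten := by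
      intro cs
      induction cs with
      | nil => intro acc; simp
      | cons c cs ihc =>
        intro acc
        simp only [List.foldl_cons, List.map_cons, List.flatten_cons]
        rw [ih c acc, ihc, List.append_assoc]
    rw [aux, List.append_assoc]

theorem pv_walkList_self {tree : List (String × List String)} {fuel : Nat} {u : String}
    (h : 1 ≤ fuel) : u ∈ pvWalkList tree fuel u := by
  rcases fuel with _ | fuel
  · omega
  · simp [pvWalkList]

-- value of the evolving frontier dict: DFP once processed, the local frontier before
def pvVal (next_map : List (String × List String)) (idom : List (String × Option String))
    (tree : List (String × List String)) (done : List String) (n : String) : List String :=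
  if n ∈ done then pvDFP next_map idom tree n else pvLocalB next_map idom n

theorem pv_val_congr (next_map : List (String × List String)) (idom : List (String × Option String))
    (tree : List (String × List String)) {d₁ d₂ : List String}
    (h : ∀ n, n ∈ d₁ ↔ n ∈ d₂) (n : String) :
    pvVal next_map idom tree d₁ n = pvVal next_map idom tree d₂ n := by
  unfold pvVal
  by_cases hn : n ∈ d₁
  · rw [if_pos hn, if_pos ((h n).mp hn)]
  · rw [if_neg hn, if_neg (fun hc => hn ((h n).mpr hc))]

theorem pv_UP_map (blocks : List (List (String × String))) (next_map : List (String × List String))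
    (idom : List (String × Option String)) (tree : List (String × List String))
    (hCyc : ∀ u ∈ pvR idom tree, u ∉ pvDescend idom tree u)
    (hChild : ∀ u ∈ pvR idom tree, ∀ c ∈ pvGetL tree u, c ∈ blocks.map pvNameOf)
    (hSelf : ∀ u ∈ pvR idom tree, pvGetL tree u ≠ [] → u ∈ blocks.map pvNameOf)
    {P : List String} {u : String} (hvia : pvVia idom tree P u)
    (done₁ : List String) (hdone : ∀ c ∈ pvGetL tree u, c ∈ done₁) :
    pvUP idom tree
        ((PySem.List.dedup (blocks.map pvNameOf)).map
          (fun n => (n, pvVal next_map idom tree done₁ n))) u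
      = (PySem.List.dedup (blocks.map pvNameOf)).map
          (fun n => (n, pvVal next_map idom tree (done₁ ++ [u]) n)) := by
  set Keys := PySem.List.dedup (blocks.map pvNameOf) with hKeys
  have huR : u ∈ pvR idom tree := pv_via_inR hCyc hvia
  by_cases htg : pvGetL tree u = []
  · unfold pvUP
    rw [htg]
    simp only [List.foldl_nil]
    apply List.map_congr_left
    intro n _
    by_cases hnu : n = u
    · subst hnu
      unfold pvVal
      by_cases hd : n ∈ done₁
      · rw [if_pos hd, if_pos (by simp [hd])]
      · rw [if_neg hd, if_pos (by simp)]
        rw [pv_DFP_unfold hCyc hvia, htg]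
        rfl
    · congr 1
      unfold pvVal
      by_cases hm : n ∈ done₁
      · rw [if_pos hm, if_pos (by simp [hm])]
      · rw [if_neg hm, if_neg (by
          intro hc
          rcases List.mem_append.mp hc with h | h
          · exact hm h
          · exact hnu (by simpa using h))]
  · -- u has children, hence u is itself a block name
    have huN : u ∈ blocks.map pvNameOf := hSelf u huR htg
    have huK : u ∈ Keys := by rw [hKeys]; exact (PySem.List.mem_dedup _ _).mpr huN
    -- the fold over the children only rewrites the entry at u, accumulating updates
    have aux : ∀ (cs : List String), (∀ c ∈ cs, c ∈ pvGetL tree u) → ∀ (w : List String),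
        cs.foldl (fun D c =>
            ((pvGet D c).getD []).foldl
              (fun D n => if pvIG idom n ≠ some u then pvDadd D u n else D) D)
          (Keys.map (fun n => (n, if n = u then w else pvVal next_map idom tree done₁ n)))
        = Keys.map (fun n => (n, if n = u
            then cs.foldl (fun s c => PySem.Set.update s
              ((pvDFP next_map idom tree c).filter (fun n => decide (pvIG idom n ≠ some u)))) w
            else pvVal next_map idom tree done₁ n)) := by
      intro cs
      induction cs with
      | nil => intro _ w; simp
      | cons c cs ihc =>
        intro hcs w
        have hcz : c ∈ pvGetL tree u := hcs c (by simp)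
        have hcu : c ≠ u := by
          have := pv_via_nostep hCyc hvia hcz
          intro hc; exact this (by simp [hc])
        have hcK : c ∈ Keys := by
          rw [hKeys]; exact (PySem.List.mem_dedup _ _).mpr (hChild u huR c hcz)
        simp only [List.foldl_cons]
        rw [pv_get_map, if_pos hcK, if_neg hcu]
        have hcd : pvVal next_map idom tree done₁ c = pvDFP next_map idom tree c := by
          unfold pvVal; rw [if_pos (hdone c hcz)]
        rw [hcd]
        simp only [Option.getD_some]
        rw [pv_folddadd_map (pvDFP next_map idom tree c) Keys _ u
          (fun n => pvIG idom n ≠ some u)]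
        rw [show (fun n => (n, if n = u
              then PySem.Set.update (if n = u then w else pvVal next_map idom tree done₁ n)
                ((pvDFP next_map idom tree c).filter (fun x => decide (pvIG idom x ≠ some u)))
              else if n = u then w else pvVal next_map idom tree done₁ n))
            = (fun n => (n, if n = u
              then PySem.Set.update w
                ((pvDFP next_map idom tree c).filter (fun x => decide (pvIG idom x ≠ some u)))
              else pvVal next_map idom tree done₁ n)) from by
          funext n; by_cases hn : n = u <;> simp [hn]]
        rw [ihc (fun c' hc' => hcs c' (by simp [hc']))]
    unfold pvUP
    have hstart : (Keys.map (fun n => (n, pvVal next_map idom tree done₁ n)))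
        = Keys.map (fun n => (n, if n = u then pvVal next_map idom tree done₁ u
            else pvVal next_map idom tree done₁ n)) := by
      apply List.map_congr_left; intro n _
      by_cases hn : n = u <;> simp [hn]
    rw [hstart, aux (pvGetL tree u) (fun c hc => hc) (pvVal next_map idom tree done₁ u)]
    apply List.map_congr_left
    intro n _
    by_cases hn : n = u
    · subst hn
      rw [if_pos rfl]
      have hval : pvVal next_map idom tree (done₁ ++ [n]) n = pvDFP next_map idom tree n := by
        unfold pvVal; rw [if_pos (by simp)]
      rw [hval]
      congr 1
      by_cases hd : n ∈ done₁
      · -- already processed: every update is a no-op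
        rw [show pvVal next_map idom tree done₁ n = pvDFP next_map idom tree n from by
          unfold pvVal; rw [if_pos hd]]
        have idem : ∀ (cs : List String), (∀ c ∈ cs, c ∈ pvGetL tree n) →
            cs.foldl (fun s c => PySem.Set.update s
              ((pvDFP next_map idom tree c).filter (fun m => decide (pvIG idom m ≠ some n))))
              (pvDFP next_map idom tree n) = pvDFP next_map idom tree n := by
          intro cs
          induction cs with
          | nil => intro _; rfl
          | cons c cs ihc =>
            intro hcs
            simp only [List.foldl_cons]
            rw [pv_update_noop (fun x hx => pv_DFP_sub hCyc hvia (hcs c (by simp)) hx)]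
            exact ihc (fun c' hc' => hcs c' (by simp [hc']))
        exact idem (pvGetL tree n) (fun c hc => hc)
      · rw [show pvVal next_map idom tree done₁ n = pvLocalB next_map idom n from by
          unfold pvVal; rw [if_neg hd]]
        exact (pv_DFP_unfold hCyc hvia).symm
    · rw [if_neg hn]
      congr 1
      unfold pvVal
      by_cases hm : n ∈ done₁
      · rw [if_pos hm, if_pos (by simp [hm])]
      · rw [if_neg hm, if_neg (by
          intro hc
          rcases List.mem_append.mp hc with h | h
          · exact hm h
          · exact hn (by simpa using h))]

theorem pv_AW (blocks : List (List (String × String))) (next_map : List (String × List String))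
    (idom : List (String × Option String)) (tree : List (String × List String))
    (hCyc : ∀ u ∈ pvR idom tree, u ∉ pvDescend idom tree u)
    (hChild : ∀ u ∈ pvR idom tree, ∀ c ∈ pvGetL tree u, c ∈ blocks.map pvNameOf)
    (hSelf : ∀ u ∈ pvR idom tree, pvGetL tree u ≠ [] → u ∈ blocks.map pvNameOf) :
    ∀ (fuel : Nat) (P : List String) (u : String) (done : List String),
      pvVia idom tree P u → tree.length < fuel + P.length →
      (pvWalkList tree fuel u).foldl (pvUP idom tree)
          ((PySem.List.dedup (blocks.map pvNameOf)).map
            (fun n => (n, pvVal next_map idom tree done n)))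
        = (PySem.List.dedup (blocks.map pvNameOf)).map
            (fun n => (n, pvVal next_map idom tree (done ++ pvWalkList tree fuel u) n)) := by
  intro fuel
  induction fuel with
  | zero =>
    intro P u done hvia hlen
    exact absurd hlen (by have := pv_via_len hCyc hvia; omega)
  | succ fuel ih =>
    intro P u done hvia hlen
    show ((((pvGetL tree u).map (fun c => pvWalkList tree fuel c)).flatten ++ [u]).foldl
        (pvUP idom tree) _) = _
    rw [List.foldl_append]
    -- process all children subtrees first
    have haux : ∀ (cs : List String), (∀ c ∈ cs, c ∈ pvGetL tree u) → ∀ (done : List String),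
        ((cs.map (fun c => pvWalkList tree fuel c)).flatten).foldl (pvUP idom tree)
            ((PySem.List.dedup (blocks.map pvNameOf)).map
              (fun n => (n, pvVal next_map idom tree done n)))
          = (PySem.List.dedup (blocks.map pvNameOf)).map
              (fun n => (n, pvVal next_map idom tree
                (done ++ (cs.map (fun c => pvWalkList tree fuel c)).flatten) n)) := by
      intro cs
      induction cs with
      | nil => intro _ done; simp
      | cons c cs ihc =>
        intro hcs done
        have hcz : c ∈ pvGetL tree u := hcs c (by simp)
        have hviac : pvVia idom tree (P ++ [u]) c := pvVia.step P u c hvia hcz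
        simp only [List.map_cons, List.flatten_cons]
        rw [List.foldl_append]
        rw [ih (P ++ [u]) c done hviac
          (by simp only [List.length_append, List.length_cons, List.length_nil]
              have hstrict := pv_via_len_strict hCyc hvia (by
                intro hnil; rw [hnil] at hcz; exact absurd hcz List.not_mem_nil)
              omega)]
        rw [ihc (fun c' hc' => hcs c' (by simp [hc'])) (done ++ pvWalkList tree fuel c)]
        rw [List.append_assoc]
    rw [haux (pvGetL tree u) (fun c hc => hc) done]
    -- then apply the upward step at u itself
    by_cases htg : pvGetL tree u = []
    · rw [htg]
      simp only [List.map_nil, List.flatten_nil, List.append_nil]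
      simp only [List.foldl_cons, List.foldl_nil]
      rw [pv_UP_map blocks next_map idom tree hCyc hChild hSelf hvia done (by
        rw [htg]; intro c hc; exact absurd hc List.not_mem_nil)]
      simp [pvWalkList, htg]
    · have hfuel1 : 1 ≤ fuel := by
        have hstrict := pv_via_len_strict hCyc hvia htg
        omega
      set done₁ := done ++ ((pvGetL tree u).map (fun c => pvWalkList tree fuel c)).flatten with hd1
      have hdone₁ : ∀ c ∈ pvGetL tree u, c ∈ done₁ := by
        intro c hc
        rw [hd1]
        apply List.mem_append.mpr
        right
        exact List.mem_flatten.mpr ⟨pvWalkList tree fuel c,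
          List.mem_map.mpr ⟨c, hc, rfl⟩, pv_walkList_self hfuel1⟩
      simp only [List.foldl_cons, List.foldl_nil]
      rw [pv_UP_map blocks next_map idom tree hCyc hChild hSelf hvia done₁ hdone₁]
      apply List.map_congr_left
      intro n _
      congr 1
      apply pv_val_congr
      intro m
      show m ∈ done₁ ++ [u] ↔ _
      rw [hd1]
      show _ ↔ m ∈ done ++ (((pvGetL tree u).map (fun c => pvWalkList tree fuel c)).flatten ++ [u])
      simp [List.mem_append]

-- === the local phase of A ===
theorem pv_localfold (blocks : List (List (String × String)))
    (next_map : List (String × List String)) (idom : List (String × Option String)) :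
    ∀ (ns : List String) (v : String → List String),
      (∀ n, v n = [] ∨ v n = pvLocalB next_map idom n) →
      ns.foldl (fun D b => (pvGetL next_map b).foldl
          (fun D s => if pvIG idom s ≠ some b then pvDadd D b s else D) D)
        ((PySem.List.dedup (blocks.map pvNameOf)).map (fun n => (n, v n)))
      = (PySem.List.dedup (blocks.map pvNameOf)).map
          (fun n => (n, if n ∈ ns then pvLocalB next_map idom n else v n)) := by
  intro ns
  induction ns with
  | nil =>
    intro v _
    simp
  | cons b ns ih =>
    intro v hv
    simp only [List.foldl_cons]
    rw [pv_folddadd_map (pvGetL next_map b) _ v b (fun s => pvIG idom s ≠ some b)]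
    have hset : ∀ n, (if n = b
        then PySem.Set.update (v n) ((pvGetL next_map b).filter
          (fun x => decide (pvIG idom x ≠ some b)))
        else v n) = (if n = b then pvLocalB next_map idom b else v n) := by
      intro n
      by_cases hn : n = b
      · subst hn
        rw [if_pos rfl, if_pos rfl]
        rcases hv n with h | h
        · rw [h]
          rfl
        · rw [h]
          apply pv_update_noop
          intro x hx
          unfold pvLocalB
          exact (PySem.Set.mem_ofList _ _).mpr hx
      · rw [if_neg hn, if_neg hn]
    rw [show (fun n => (n, if n = b
        then PySem.Set.update (v n) ((pvGetL next_map b).filter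
          (fun x => decide (pvIG idom x ≠ some b)))
        else v n)) = (fun n => (n, if n = b then pvLocalB next_map idom b else v n)) from by
      funext n; rw [hset n]]
    rw [ih _ (by
      intro n
      by_cases hn : n = b
      · subst hn; right; simp
      · rw [if_neg hn]; exact hv n)]
    apply List.map_congr_left
    intro n _
    by_cases h1 : n ∈ ns <;> by_cases h2 : n = b <;> simp [h1, h2]

-- === small dict lemmas for B's memo ===
theorem pv_get_cons (p : String × List String) (M : List (String × List String)) (x : String) :
    pvGet (p :: M) x = if p.1 = x then some p.2 else pvGet M x := by
  by_cases h : p.1 = x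
  · simp [pvGet, List.find?, h]
  · simp only [pvGet, List.find?, show (p.1 == x) = false by simpa using h, if_neg h]

theorem pv_get_over (M : List (String × List String)) (k : String) (v : List String) (x : String) :
    pvGet (M.map (fun p => if p.1 == k then (p.1, v) else p)) x
      = if x = k then (if (pvGet M k).isSome then some v else none) else pvGet M x := by
  induction M with
  | nil => by_cases h : x = k <;> simp [pvGet, h]
  | cons p M ih =>
    have hsplit : ((if p.1 == k then (p.1, v) else p) : String × List String)
        = (p.1, if p.1 = k then v else p.2) := by
      by_cases h : p.1 = k <;> simp [h]
    rw [List.map_cons, hsplit, pv_get_cons, pv_get_cons, pv_get_cons, ih]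
    by_cases h1 : p.1 = x <;> by_cases h2 : x = k
    · subst h1; subst h2; simp
    · simp [h1, h2]
    · subst h2
      simp only [if_pos rfl]
      simp [h1]
    · simp [h1, h2]

theorem pv_get_dinsert (M : List (String × List String)) (k : String) (v : List String)
    (x : String) : pvGet (pvDinsert M k v) x = if x = k then some v else pvGet M x := by
  unfold pvDinsert
  by_cases hk : (pvGet M k).isSome
  · rw [if_pos hk, pv_get_over, if_pos hk]
  · rw [if_neg hk]
    by_cases hxk : x = k
    · subst hxk
      rw [if_pos rfl]
      rcases hg : pvGet M x with _ | w
      · unfold pvGet at hg ⊢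
        rw [List.find?_append]
        rcases hf : M.find? (fun p => p.1 == x) with _ | q
        · rw [hf, Option.none_or]
          simp [List.find?]
        · rw [hf] at hg; simp at hg
      · rw [hg] at hk; simp at hk
    · rw [if_neg hxk]
      unfold pvGet
      rw [List.find?_append]
      rcases hf : M.find? (fun p => p.1 == x) with _ | q
      · rw [hf, Option.none_or]
        have hne : (((k, v) : String × List String).1 == x) = false := by
          simpa using fun h => hxk h.symm
        simp [List.find?, hne]
      · rw [hf, Option.some_or]

-- === B's memo invariants ===
theorem pv_WS {tree : List (String × List String)} {M : List (String × List String)}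
    (hcl : ∀ x, (pvGet M x).isSome = true → ∀ c ∈ pvGetL tree x, (pvGet M c).isSome = true) :
    ∀ (fuel : Nat) (u : String), (pvGet M u).isSome = true →
      ∀ x ∈ pvWalkList tree fuel u, (pvGet M x).isSome = true := by
  intro fuel
  induction fuel with
  | zero => intro u _ x hx; simp [pvWalkList] at hx
  | succ fuel ih =>
    intro u hu x hx
    rcases List.mem_append.mp hx with hx | hx
    · rcases List.mem_flatten.mp hx with ⟨l, hl, hxl⟩
      rcases List.mem_map.mp hl with ⟨c, hc, rfl⟩
      exact ih c (hcl u hu c hc) x hxl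
    · have : x = u := by simpa using hx
      subst this; exact hu

theorem pv_BW (next_map : List (String × List String)) (idom : List (String × Option String))
    (tree : List (String × List String))
    (hCyc : ∀ u ∈ pvR idom tree, u ∉ pvDescend idom tree u) :
    ∀ (fuel : Nat) (P : List String) (u : String) (M : List (String × List String)),
      pvVia idom tree P u → tree.length < fuel + P.length →
      (∀ x v, pvGet M x = some v → v = pvDFP next_map idom tree x) →
      (∀ x, (pvGet M x).isSome = true → ∀ c ∈ pvGetL tree x, (pvGet M c).isSome = true) →
      (pvDfB next_map idom tree fuel u M).2 = pvDFP next_map idom tree u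
      ∧ (∀ x v, pvGet (pvDfB next_map idom tree fuel u M).1 x = some v →
          v = pvDFP next_map idom tree x)
      ∧ (∀ x, (pvGet (pvDfB next_map idom tree fuel u M).1 x).isSome = true →
          ∀ c ∈ pvGetL tree x, (pvGet (pvDfB next_map idom tree fuel u M).1 c).isSome = true)
      ∧ (∀ x, (pvGet (pvDfB next_map idom tree fuel u M).1 x).isSome = true ↔
          ((pvGet M x).isSome = true ∨ x ∈ pvWalkList tree fuel u)) := by
  intro fuel
  induction fuel with
  | zero =>
    intro P u M hvia hlen _ _
    exact absurd hlen (by have := pv_via_len hCyc hvia; omega)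
  | succ fuel ih =>
    intro P u M hvia hlen hval hcl
    rcases hget : pvGet M u with _ | v
    · -- memo miss: recurse over the children, then insert
      -- the accumulated fold over the children
      have haux : ∀ (cs : List String), (∀ c ∈ cs, c ∈ pvGetL tree u) →
          ∀ (M₀ : List (String × List String)) (res₀ : List String),
          (∀ x v, pvGet M₀ x = some v → v = pvDFP next_map idom tree x) →
          (∀ x, (pvGet M₀ x).isSome = true → ∀ c ∈ pvGetL tree x, (pvGet M₀ c).isSome = true) →
          (cs.foldl (fun (p : List (String × List String) × List String) c =>
              let q := pvDfB next_map idom tree fuel c p.1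
              (q.1, PySem.Set.union p.2
                (PySem.Set.ofList (q.2.filter (fun n => pvIG idom n ≠ some u)))))
            (M₀, res₀)).2
            = cs.foldl (fun s c => PySem.Set.update s
                ((pvDFP next_map idom tree c).filter (fun n => decide (pvIG idom n ≠ some u))))
                res₀
          ∧ (∀ x v, pvGet (cs.foldl (fun (p : List (String × List String) × List String) c =>
              let q := pvDfB next_map idom tree fuel c p.1
              (q.1, PySem.Set.union p.2
                (PySem.Set.ofList (q.2.filter (fun n => pvIG idom n ≠ some u)))))
            (M₀, res₀)).1 x = some v → v = pvDFP next_map idom tree x)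
          ∧ (∀ x, (pvGet (cs.foldl (fun (p : List (String × List String) × List String) c =>
              let q := pvDfB next_map idom tree fuel c p.1
              (q.1, PySem.Set.union p.2
                (PySem.Set.ofList (q.2.filter (fun n => pvIG idom n ≠ some u)))))
            (M₀, res₀)).1 x).isSome = true →
              ∀ c ∈ pvGetL tree x, (pvGet (cs.foldl (fun (p : List (String × List String) × List String) c =>
              let q := pvDfB next_map idom tree fuel c p.1
              (q.1, PySem.Set.union p.2
                (PySem.Set.ofList (q.2.filter (fun n => pvIG idom n ≠ some u)))))
            (M₀, res₀)).1 c).isSome = true)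
          ∧ (∀ x, (pvGet (cs.foldl (fun (p : List (String × List String) × List String) c =>
              let q := pvDfB next_map idom tree fuel c p.1
              (q.1, PySem.Set.union p.2
                (PySem.Set.ofList (q.2.filter (fun n => pvIG idom n ≠ some u)))))
            (M₀, res₀)).1 x).isSome = true ↔
              ((pvGet M₀ x).isSome = true ∨
                x ∈ (cs.map (fun c => pvWalkList tree fuel c)).flatten)) := by
        intro cs
        induction cs with
        | nil =>
          intro _ M₀ res₀ hv0 hc0
          refine ⟨rfl, hv0, hc0, by simp⟩
        | cons c cs ihc =>
          intro hcs M₀ res₀ hv0 hc0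
          have hcz : c ∈ pvGetL tree u := hcs c (by simp)
          have hviac : pvVia idom tree (P ++ [u]) c := pvVia.step P u c hvia hcz
          have hlenc : tree.length < fuel + (P ++ [u]).length := by
            simp only [List.length_append, List.length_cons, List.length_nil]
            have := pv_via_len_strict hCyc hvia (by
              intro hnil; rw [hnil] at hcz; exact absurd hcz List.not_mem_nil)
            omega
          obtain ⟨hq2, hqval, hqcl, hqkeys⟩ := ih (P ++ [u]) c M₀ hviac hlenc hv0 hc0
          simp only [List.foldl_cons]
          obtain ⟨ha, hb, hc', hd⟩ := ihc (fun c' hc' => hcs c' (by simp [hc']))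
            (pvDfB next_map idom tree fuel c M₀).1
            (PySem.Set.union res₀ (PySem.Set.ofList
              ((pvDfB next_map idom tree fuel c M₀).2.filter (fun n => pvIG idom n ≠ some u))))
            hqval hqcl
          refine ⟨?_, hb, hc', ?_⟩
          · rw [ha, hq2]
            congr 1
            show PySem.Set.update res₀ (PySem.Set.ofList _) = _
            rw [pv_update_ofList]
          · intro x
            rw [hd x, hqkeys x]
            simp only [List.map_cons, List.flatten_cons, List.mem_append]
            tauto
      obtain ⟨hr2, hrval, hrcl, hrkeys⟩ := haux (pvGetL tree u) (fun c hc => hc) M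
        (pvLocalB next_map idom u) hval hcl
      have hfalse : (pvGet M u).isSome = false := by rw [hget]; rfl
      set R := (pvGetL tree u).foldl (fun (p : List (String × List String) × List String) c =>
          let q := pvDfB next_map idom tree fuel c p.1
          (q.1, PySem.Set.union p.2
            (PySem.Set.ofList (q.2.filter (fun n => pvIG idom n ≠ some u)))))
        (M, pvLocalB next_map idom u) with hR
      have hred : pvDfB next_map idom tree (fuel+1) u M
          = (pvDinsert R.1 u R.2, (pvGet (pvDinsert R.1 u R.2) u).getD []) := by
        simp only [pvDfB, hfalse, Bool.false_eq_true, if_false]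
        rfl
      have hR2 : R.2 = pvDFP next_map idom tree u :=
        hr2.trans (pv_DFP_unfold hCyc hvia).symm
      have hfuel1 : pvGetL tree u ≠ [] → 1 ≤ fuel := by
        intro htg
        have := pv_via_len_strict hCyc hvia htg
        omega
      have hchildkey : ∀ c ∈ pvGetL tree u, (pvGet R.1 c).isSome = true := by
        intro c hc
        rw [hrkeys c]
        right
        refine List.mem_flatten.mpr ⟨pvWalkList tree fuel c, List.mem_map.mpr ⟨c, hc, rfl⟩, ?_⟩
        exact pv_walkList_self (hfuel1 (by intro hnil; rw [hnil] at hc; exact absurd hc List.not_mem_nil))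
      rw [hred]
      refine ⟨?_, ?_, ?_, ?_⟩
      · show (pvGet (pvDinsert R.1 u R.2) u).getD [] = _
        rw [pv_get_dinsert, if_pos rfl, Option.getD_some, hR2]
      · intro x v hx
        rw [pv_get_dinsert] at hx
        by_cases hxu : x = u
        · rw [if_pos hxu] at hx
          subst hxu
          have : v = R.2 := by injection hx.symm
          rw [this, hR2]
        · rw [if_neg hxu] at hx
          exact hrval x v hx
      · intro x hx c hc
        rw [pv_get_dinsert] at hx ⊢
        by_cases hcu : c = u
        · rw [if_pos hcu]; rfl
        · rw [if_neg hcu]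
          by_cases hxu : x = u
          · subst hxu
            have := hchildkey c hc
            exact this
          · rw [if_neg hxu] at hx
            exact hrcl x hx c hc
      · intro x
        rw [pv_get_dinsert]
        show _ ↔ _ ∨ x ∈ ((pvGetL tree u).map (fun c => pvWalkList tree fuel c)).flatten ++ [u]
        by_cases hxu : x = u
        · subst hxu
          simp
        · rw [if_neg hxu, hrkeys x]
          simp only [List.mem_append, List.mem_singleton]
          constructor
          · rintro (h | h)
            · exact Or.inl h
            · exact Or.inr (Or.inl h)
          · rintro (h | h | h)
            · exact Or.inl h
            · exact Or.inr h
            · exact absurd h hxu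
    · -- memo hit
      have htrue : (pvGet M u).isSome = true := by rw [hget]; rfl
      have hred : pvDfB next_map idom tree (fuel+1) u M = (M, (pvGet M u).getD []) := by
        simp only [pvDfB, htrue, if_true]
      rw [hred]
      refine ⟨?_, hval, hcl, ?_⟩
      · show (pvGet M u).getD [] = _
        rw [hget, Option.getD_some]
        exact hval u v hget
      · intro x
        constructor
        · intro h; exact Or.inl h
        · rintro (h | h)
          · exact h
          · exact pv_WS hcl (fuel+1) u htrue x h

-- === assembling the two ports ===
theorem pv_post_eq (tree : List (String × List String)) (F : Nat) :
    ∀ (rs : List String) (acc : List String),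
      rs.foldl (fun acc r => pvWalkA tree F r acc) acc
        = acc ++ (rs.map (fun r => pvWalkList tree F r)).flatten := by
  intro rs
  induction rs with
  | nil => intro acc; simp
  | cons r rs ih =>
    intro acc
    simp only [List.foldl_cons, List.map_cons, List.flatten_cons]
    rw [pv_walkA_eq, ih, List.append_assoc]

theorem pv_A_roots (blocks : List (List (String × String))) (next_map : List (String × List String))
    (idom : List (String × Option String)) (tree : List (String × List String))
    (hCyc : ∀ u ∈ pvR idom tree, u ∉ pvDescend idom tree u)
    (hChild : ∀ u ∈ pvR idom tree, ∀ c ∈ pvGetL tree u, c ∈ blocks.map pvNameOf)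
    (hSelf : ∀ u ∈ pvR idom tree, pvGetL tree u ≠ [] → u ∈ blocks.map pvNameOf) :
    ∀ (rs : List String), (∀ r ∈ rs, r ∈ pvRoots idom) → ∀ (done : List String),
      ((rs.map (fun r => pvWalkList tree (tree.length + 1) r)).flatten).foldl (pvUP idom tree)
          ((PySem.List.dedup (blocks.map pvNameOf)).map
            (fun n => (n, pvVal next_map idom tree done n)))
        = (PySem.List.dedup (blocks.map pvNameOf)).map
            (fun n => (n, pvVal next_map idom tree
              (done ++ (rs.map (fun r => pvWalkList tree (tree.length + 1) r)).flatten) n)) := by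
  intro rs
  induction rs with
  | nil => intro _ done; simp
  | cons r rs ih =>
    intro hrs done
    simp only [List.map_cons, List.flatten_cons]
    rw [List.foldl_append]
    rw [pv_AW blocks next_map idom tree hCyc hChild hSelf (tree.length + 1) [] r done
      (pvVia.root r (hrs r (by simp))) (by simp)]
    rw [ih (fun r' hr' => hrs r' (by simp [hr'])) (done ++ pvWalkList tree (tree.length+1) r)]
    rw [List.append_assoc]

theorem pv_B_roots (next_map : List (String × List String)) (idom : List (String × Option String))
    (tree : List (String × List String))
    (hCyc : ∀ u ∈ pvR idom tree, u ∉ pvDescend idom tree u) :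
    ∀ (rs : List String), (∀ r ∈ rs, r ∈ pvRoots idom) →
      ∀ (M : List (String × List String)) (D : List String),
      (∀ x v, pvGet M x = some v → v = pvDFP next_map idom tree x) →
      (∀ x, (pvGet M x).isSome = true → ∀ c ∈ pvGetL tree x, (pvGet M c).isSome = true) →
      (∀ x, (pvGet M x).isSome = true ↔ x ∈ D) →
      (∀ x v, pvGet (rs.foldl (fun D r =>
          (pvDfB next_map idom tree (tree.length + 1) r D).1) M) x = some v →
            v = pvDFP next_map idom tree x)
      ∧ (∀ x, (pvGet (rs.foldl (fun D r =>
          (pvDfB next_map idom tree (tree.length + 1) r D).1) M) x).isSome = true ↔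
            x ∈ D ++ (rs.map (fun r => pvWalkList tree (tree.length + 1) r)).flatten) := by
  intro rs
  induction rs with
  | nil =>
    intro _ M D hval hcl hkeys
    refine ⟨hval, by simpa using hkeys⟩
  | cons r rs ih =>
    intro hrs M D hval hcl hkeys
    obtain ⟨hv1, hval1, hcl1, hkeys1⟩ := pv_BW next_map idom tree hCyc (tree.length + 1) [] r M
      (pvVia.root r (hrs r (by simp))) (by simp) hval hcl
    simp only [List.foldl_cons]
    obtain ⟨hv2, hk2⟩ := ih (fun r' hr' => hrs r' (by simp [hr']))
      (pvDfB next_map idom tree (tree.length + 1) r M).1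
      (D ++ pvWalkList tree (tree.length + 1) r) hval1 hcl1
      (by
        intro x
        rw [hkeys1 x, hkeys x]
        simp [List.mem_append])
    refine ⟨hv2, ?_⟩
    intro x
    rw [hk2 x]
    simp [List.mem_append]

-- ===== VERDICT (by name: the statement is the Claim_ definition above) =====
theorem dom_frontier_spec : Claim_equal_dom_frontier := by
  intro blocks next_map idom tree hDom hPre
  obtain ⟨-, hCyc, hChild, hSelf⟩ := hPre
  show dom_frontier blocks next_map idom tree = dom_frontier_alt blocks next_map idom tree
  unfold dom_frontier dom_frontier_alt
  simp only []
  -- the local phase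
  rw [pv_localfold blocks next_map idom (blocks.map pvNameOf) (fun _ => []) (fun _ => Or.inl rfl)]
  -- the postorder list
  rw [pv_post_eq tree (tree.length + 1) (pvRoots idom) []]
  simp only [List.nil_append]
  -- rewrite the start state into pvVal form
  rw [show (PySem.List.dedup (blocks.map pvNameOf)).map
        (fun n => (n, if n ∈ blocks.map pvNameOf then pvLocalB next_map idom n else []))
      = (PySem.List.dedup (blocks.map pvNameOf)).map
        (fun n => (n, pvVal next_map idom tree [] n)) from by
    apply List.map_congr_left
    intro n hn
    have hnn : n ∈ blocks.map pvNameOf := (PySem.List.mem_dedup _ _).mp hn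
    rw [if_pos hnn]
    unfold pvVal
    rw [if_neg (List.not_mem_nil)]]
  -- the upward phase
  rw [pv_A_roots blocks next_map idom tree hCyc hChild hSelf (pvRoots idom) (fun r hr => hr) []]
  simp only [List.nil_append]
  -- the B side
  obtain ⟨hval, hkeys⟩ := pv_B_roots next_map idom tree hCyc (pvRoots idom) (fun r hr => hr)
    [] [] (by intro x v h; exact absurd h (by simp [pvGet])) (by intro x h; simp [pvGet] at h)
    (by intro x; simp [pvGet])
  apply List.map_congr_left
  intro n _
  rcases hg : pvGet ((pvRoots idom).foldl (fun D r =>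
      (pvDfB next_map idom tree (tree.length + 1) r D).1) []) n with _ | v
  · have hns : ¬ ((pvGet ((pvRoots idom).foldl (fun D r =>
        (pvDfB next_map idom tree (tree.length + 1) r D).1) []) n).isSome = true) := by
      rw [hg]; simp
    have hnd : n ∉ ((pvRoots idom).map
        (fun r => pvWalkList tree (tree.length + 1) r)).flatten := by
      intro hc
      exact hns ((hkeys n).mpr (by simpa using hc))
    unfold pvVal
    rw [if_neg hnd]
  · have hs : (pvGet ((pvRoots idom).foldl (fun D r =>
        (pvDfB next_map idom tree (tree.length + 1) r D).1) []) n).isSome = true := by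
      rw [hg]; rfl
    have hnd : n ∈ ((pvRoots idom).map
        (fun r => pvWalkList tree (tree.length + 1) r)).flatten := by
      simpa using (hkeys n).mp hs
    unfold pvVal
    rw [if_pos hnd]
    exact (hval n v hg).symm ▸ rfl
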